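-- pv_equiv track=rewrite | github.com/MiraiYuuki/discordbot | deresdata/ark.py | title_split
-- ===== SOURCE A (Python) =====
-- import unicodedata
--
-- def title_split(t):
--     words = unicodedata.normalize("NFD", t)
--     buf = []
--
--     for ch in words:
--         ca = unicodedata.category(ch)
--         if ca[0] in {"S", "Z", "P"}:
--             if buf:
--                 yield "".join(buf).lower()
--                 buf = []
--             continue
--
--         if ca[0] == "M":
--             continue
--
--         buf.append(ch)
--     else:
--         if buf:
--             yield "".join(buf).lower()
-- ===== SOURCE B (Python) =====
-- import unicodedata
-- from itertools import groupby
--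
-- def title_split(t):
--     filtered = (ch for ch in unicodedata.normalize("NFD", t)
--                 if unicodedata.category(ch)[0] != "M")
--     for is_sep, group in groupby(filtered,
--                                  key=lambda ch: unicodedata.category(ch)[0] in {"S", "Z", "P"}):
--         if not is_sep:
--             yield "".join(group).lower()
-- ===== Notes on version B (the rewrite author's own statement) =====
-- stated objective: alternative
-- what changed: Replaces A's manual mutable word buffer with a filter of combining marks followed by itertools.groupby keyed on separator-class, joining and lowercasing each non-separator run.
import Mathlib
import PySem

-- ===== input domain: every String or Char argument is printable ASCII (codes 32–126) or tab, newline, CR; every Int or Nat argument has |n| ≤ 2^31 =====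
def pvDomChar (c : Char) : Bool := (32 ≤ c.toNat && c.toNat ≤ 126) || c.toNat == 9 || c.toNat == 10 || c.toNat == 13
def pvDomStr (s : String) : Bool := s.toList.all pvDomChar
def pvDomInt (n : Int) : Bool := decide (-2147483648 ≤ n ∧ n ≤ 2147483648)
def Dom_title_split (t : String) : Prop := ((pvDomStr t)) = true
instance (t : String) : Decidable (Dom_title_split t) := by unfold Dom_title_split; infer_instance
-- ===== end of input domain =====

-- B rewrites A's manual buffer loop as filter + groupby-on-separator-class + join; same cost, different decomposition.

-- Shared classification: unicodedata.category(ch)[0] ∈ {"S","Z","P"}.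
-- Exact on the stated domain (printable ASCII + tab/newline/CR): there the S/Z/P
-- characters are exactly the printable non-alphanumerics; tab/newline/CR are Cc.
def tsSep (c : Char) : Bool :=
  (32 ≤ c.toNat && c.toNat ≤ 126) &&
  !(('a' ≤ c && c ≤ 'z') || ('A' ≤ c && c ≤ 'Z') || ('0' ≤ c && c ≤ '9'))

-- ===== PORT A =====
-- NFD normalization is the identity on the stated ASCII domain, and no characters of
-- category "M" exist there, so the "M" branch never fires; both are ported as such.
-- A's generator loop over the characters with its word buffer `buf` (appended at the end):
def tsLoop : List Char → List Char → List String
  | [], buf => if buf = [] then [] else [PySem.Str.lower (String.mk buf)]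
  | ch :: rest, buf =>
    if tsSep ch then
      (if buf = [] then [] else [PySem.Str.lower (String.mk buf)]) ++ tsLoop rest []
    else
      tsLoop rest (buf ++ [ch])

def title_split (t : String) : List String := tsLoop t.toList []

-- ===== PORT B =====
-- itertools.groupby over the character stream, key = tsSep (runs of equal key):
def tsGroups : List Char → List (Bool × List Char)
  | [] => []
  | c :: rest =>
    match tsGroups rest with
    | (b, g) :: gs => if tsSep c = b then (b, c :: g) :: gs else (tsSep c, [c]) :: (b, g) :: gs
    | [] => [(tsSep c, [c])]

-- for each (is_sep, group): if not is_sep, yield "".join(group).lower()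
def title_split_alt (t : String) : List String :=
  ((tsGroups t.toList).filter (fun p => !p.1)).map
    (fun p => PySem.Str.lower (String.mk p.2))

-- ===== PRECONDITION & SPEC =====
def Spec_title_split (t : String) (out : List String) : Prop := out = title_split_alt t
instance (t : String) (out : List String) : Decidable (Spec_title_split t out) := by unfold Spec_title_split; infer_instance

-- ===== CLAIM (what is proved, stated in full; the proofs are below) =====
def Claim_equal_title_split : Prop := ∀ (t : String), Dom_title_split t → Spec_title_split t (title_split t)

-- ===== LEMMAS AND PROOFS =====

-- rendering of a group list (proof-only helper)
def tsRender (gs : List (Bool × List Char)) : List String :=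
  (gs.filter (fun p => !p.1)).map (fun p => PySem.Str.lower (String.mk p.2))

-- emitting with a pending buffer: the buffer fuses with a leading non-separator group
def tsEmit (buf : List Char) (gs : List (Bool × List Char)) : List String :=
  match gs with
  | (false, g) :: gs' => PySem.Str.lower (String.mk (buf ++ g)) :: tsRender gs'
  | _ => (if buf = [] then [] else [PySem.Str.lower (String.mk buf)]) ++ tsRender gs

theorem tsEmit_nil (gs : List (Bool × List Char)) : tsEmit [] gs = tsRender gs := by
  match gs with
  | [] => rfl
  | (true, g) :: gs' => simp [tsEmit, tsRender]
  | (false, g) :: gs' => simp [tsEmit, tsRender]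

theorem tsLoop_emit (l buf : List Char) : tsLoop l buf = tsEmit buf (tsGroups l) := by
  induction l generalizing buf with
  | nil => simp [tsLoop, tsGroups, tsEmit, tsRender]
  | cons c rest ih =>
    by_cases hs : tsSep c = true
    · have hrest := ih []
      rw [tsEmit_nil] at hrest
      simp only [tsLoop, hs, if_pos rfl, hrest]
      cases hg : tsGroups rest with
      | nil => simp [tsGroups, hg, hs, tsEmit, tsRender]
      | cons p gs =>
        obtain ⟨b, g⟩ := p
        cases b with
        | true => simp [tsGroups, hg, hs, tsEmit, tsRender]
        | false => simp [tsGroups, hg, hs, tsEmit, tsRender]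
    · have hs' : tsSep c = false := by simpa using hs
      simp only [tsLoop, hs', Bool.false_eq_true, if_false, ih]
      cases hg : tsGroups rest with
      | nil => simp [tsGroups, hg, hs', tsEmit, tsRender]
      | cons p gs =>
        obtain ⟨b, g⟩ := p
        cases b with
        | true => simp [tsGroups, hg, hs', tsEmit, tsRender]
        | false => simp [tsGroups, hg, hs', tsEmit, tsRender]

-- ===== VERDICT (by name: the statement is the Claim_ definition above) =====
theorem title_split_spec : Claim_equal_title_split := by
  intro t _
  unfold Spec_title_split title_split title_split_alt
  rw [tsLoop_emit, tsEmit_nil, tsRender]
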